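-- pv_equiv track=rewrite | github.com/thinkube/thinkube-control | backend/app/services/llm_lifecycle.py | _find_ollama_name
-- ===== SOURCE A (Python) =====
-- from typing import Optional
--
-- def _find_ollama_name(model_id: str, available: list[str]) -> Optional[str]:
--     for name in available:
--         if name == model_id or name.startswith(f"{model_id}:"):
--             return name
--     short = model_id.split("/")[-1] if "/" in model_id else model_id
--     for name in available:
--         if name == short or name.startswith(f"{short}:"):
--             return name
--     return None
-- ===== SOURCE B (Python) =====
-- def _find_ollama_name(model_id: str, available: list[str]):
--     short = model_id.split("/")[-1] if "/" in model_id else model_id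
--     fallback = None
--     for name in available:
--         if name == model_id or name.startswith(model_id + ":"):
--             return name
--         if fallback is None and (name == short or name.startswith(short + ":")):
--             fallback = name
--     return fallback
-- ===== Notes on version B (the rewrite author's own statement) =====
-- stated objective: alternative
-- what changed: Collapses A's two sequential scans over `available` into a single pass that returns a model_id match eagerly and keeps the first short-name match as a pending fallback returned at the end.
import Mathlib
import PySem

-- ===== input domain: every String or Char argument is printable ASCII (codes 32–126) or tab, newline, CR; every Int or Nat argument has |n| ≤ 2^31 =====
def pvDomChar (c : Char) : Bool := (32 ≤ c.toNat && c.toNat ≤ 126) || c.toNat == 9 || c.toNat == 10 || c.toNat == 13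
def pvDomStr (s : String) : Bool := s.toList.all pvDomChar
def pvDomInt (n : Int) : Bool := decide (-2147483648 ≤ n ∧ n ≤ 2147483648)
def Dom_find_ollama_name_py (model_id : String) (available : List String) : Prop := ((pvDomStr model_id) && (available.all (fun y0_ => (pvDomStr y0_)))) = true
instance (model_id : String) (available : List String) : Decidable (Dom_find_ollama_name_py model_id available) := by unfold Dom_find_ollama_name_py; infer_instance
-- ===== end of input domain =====

-- B replaces A's two sequential scans by one pass with a pending fallback; same result, same cost (objective: alternative).
-- ===== PORT A =====
-- short = model_id.split("/")[-1] if "/" in model_id else model_id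
-- (splitOn with a nonempty separator never returns [], so list[-1] is its getLast)
def pvShort (model_id : String) : String :=
  if PySem.Str.isIn "/" model_id then (((PySem.Str.split? model_id "/").getD []).getLast?).getD model_id
  else model_id

-- the loop body shared by A's two scans: 'if name == t or name.startswith(t + ":"): return name'
def pvLoopA (t : String) : List String → Option String
  | [] => none
  | n :: rest => if n == t || PySem.Str.startswith n (t ++ ":") then some n else pvLoopA t rest

def find_ollama_name_py (model_id : String) (available : List String) : Option String :=
  match pvLoopA model_id available with
  | some n => some n
  | none => pvLoopA (pvShort model_id) available

-- ===== PORT B =====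
-- single pass: eager return on a model_id match, first short match kept as fallback
def pvLoopB (mid short : String) (fallback : Option String) : List String → Option String
  | [] => fallback
  | n :: rest =>
    if n == mid || PySem.Str.startswith n (mid ++ ":") then some n
    else pvLoopB mid short
      (if fallback.isNone && (n == short || PySem.Str.startswith n (short ++ ":")) then some n
       else fallback) rest

def find_ollama_name_py_alt (model_id : String) (available : List String) : Option String :=
  pvLoopB model_id (pvShort model_id) none available

-- ===== PRECONDITION & SPEC =====
def Spec_find_ollama_name_py (model_id : String) (available : List String) (out : Option String) : Prop := out = find_ollama_name_py_alt model_id available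
instance (model_id : String) (available : List String) (out : Option String) : Decidable (Spec_find_ollama_name_py model_id available out) := by unfold Spec_find_ollama_name_py; infer_instance

-- ===== CLAIM (what is proved, stated in full; the proofs are below) =====
def Claim_equal_find_ollama_name_py : Prop := ∀ (model_id : String) (available : List String), Dom_find_ollama_name_py model_id available → Spec_find_ollama_name_py model_id available (find_ollama_name_py model_id available)

-- ===== LEMMAS AND PROOFS =====

-- ===== VERDICT (by name: the statement is the Claim_ definition above) =====
theorem pvLoopB_eq (mid short : String) (xs : List String) (fb : Option String) :
    pvLoopB mid short fb xs = ((pvLoopA mid xs).or (fb.or (pvLoopA short xs))) := by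
  induction xs generalizing fb with
  | nil => simp [pvLoopA, pvLoopB]
  | cons n rest ih =>
    simp only [pvLoopA, pvLoopB]
    split_ifs <;>
      first
        | rfl
        | (rw [ih]; try (cases fb <;> simp_all [Option.or]))

theorem find_ollama_name_py_spec : Claim_equal_find_ollama_name_py := by
  intro mid avail _
  unfold Spec_find_ollama_name_py find_ollama_name_py find_ollama_name_py_alt
  rw [pvLoopB_eq]
  cases h : pvLoopA mid avail <;> simp [Option.or]
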